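-- pv_equiv track=rewrite | github.com/MariekePop/Generative-Medical-Imaging-and-Tumor-Segmentation | nnUNet_results/extra_experiment_radiologists/plot_bars_multi.py | sequence_breakdown
-- ===== SOURCE A (Python) =====
-- from collections import defaultdict
--
-- def sequence_breakdown(slides_info, predictions, reader_subset):
--     """
--     Returns dict: sequence → {'TN', 'FP', 'FN', 'TP'} counts summed
--                   over reader_subset.
--     """
--     stats = defaultdict(lambda: dict(TN=0, FP=0, FN=0, TP=0))
--     for reader in reader_subset:
--         preds = predictions[reader]
--         for slide, (seq, truth) in slides_info.items():
--             pred = preds.get(slide)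
--             if pred is None:
--                 continue
--             if truth == "gen" and pred == "gen":
--                 stats[seq]["TP"] += 1
--             elif truth == "gen" and pred == "real":
--                 stats[seq]["FN"] += 1
--             elif truth == "real" and pred == "real":
--                 stats[seq]["TN"] += 1
--             elif truth == "real" and pred == "gen":
--                 stats[seq]["FP"] += 1
--     return stats
-- ===== SOURCE B (Python) =====
-- from collections import defaultdict, Counter
--
-- _TABLE = {("gen", "gen"): "TP", ("gen", "real"): "FN",
--           ("real", "real"): "TN", ("real", "gen"): "FP"}
--
-- def sequence_breakdown(slides_info, predictions, reader_subset):
--     # classify every (reader, slide) pair via the lookup table into an event list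
--     events = [(seq, _TABLE[(truth, pred)])
--               for reader in reader_subset
--               for slide, (seq, truth) in slides_info.items()
--               for pred in (predictions[reader].get(slide),)
--               if (truth, pred) in _TABLE]
--     counts = Counter(events)
--     order = list(dict.fromkeys(seq for seq, _ in events))
--     stats = defaultdict(lambda: dict(TN=0, FP=0, FN=0, TP=0))
--     for seq in order:
--         for cls in ("TN", "FP", "FN", "TP"):
--             stats[seq][cls] = counts[(seq, cls)]
--     return stats
-- ===== Notes on version B (the rewrite author's own statement) =====
-- stated objective: alternative
-- what changed: A's nested reader/slide loops with a four-way branch chain mutating nested dicts are replaced by a single classification pass via a (truth,pred) lookup table producing an event list, a Counter aggregation, and a final assembly in first-occurrence key order.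
import Mathlib
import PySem

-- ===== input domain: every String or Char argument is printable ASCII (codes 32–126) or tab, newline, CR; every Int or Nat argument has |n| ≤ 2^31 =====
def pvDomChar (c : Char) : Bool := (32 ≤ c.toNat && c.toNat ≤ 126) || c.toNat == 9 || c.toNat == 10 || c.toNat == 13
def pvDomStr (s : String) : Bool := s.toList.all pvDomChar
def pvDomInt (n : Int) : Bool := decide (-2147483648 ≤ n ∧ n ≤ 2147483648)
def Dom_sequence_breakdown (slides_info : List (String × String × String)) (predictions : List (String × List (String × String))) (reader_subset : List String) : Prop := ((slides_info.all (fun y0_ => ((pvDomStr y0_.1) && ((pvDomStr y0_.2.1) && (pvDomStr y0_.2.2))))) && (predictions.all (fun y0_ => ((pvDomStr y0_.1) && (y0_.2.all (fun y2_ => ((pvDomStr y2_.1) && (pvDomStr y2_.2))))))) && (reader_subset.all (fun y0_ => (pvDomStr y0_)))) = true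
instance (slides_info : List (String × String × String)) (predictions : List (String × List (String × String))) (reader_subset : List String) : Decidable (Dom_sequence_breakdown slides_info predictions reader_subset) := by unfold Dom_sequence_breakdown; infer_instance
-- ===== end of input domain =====

-- ===== PORT A =====
-- B replaces A's nested loops + four-way branch chain by a table-classified event list, a Counter, and an ordered assembly (alternative decomposition, same cost); return-value equivalence only (neither mutates its arguments).
-- Pre_ below excludes exactly the inputs where A raises KeyError (a reader missing from predictions).
def pvDefault : PySem.Dict String Int := PySem.Dict.mk [("TN", 0), ("FP", 0), ("FN", 0), ("TP", 0)]

def pvBumpA (stats : PySem.Dict String (PySem.Dict String Int)) (seq cls : String) : PySem.Dict String (PySem.Dict String Int) :=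
  stats.insert seq ((stats.getD seq pvDefault).modify cls 0 (· + 1))

def sequence_breakdown (slides_info : List (String × String × String)) (predictions : List (String × List (String × String))) (reader_subset : List String) : List (String × List (String × Int)) :=
  let stats := reader_subset.foldl (fun stats reader =>
    -- predictions[reader] raises KeyError when absent; total form getD [] — Pre_ excludes those inputs
    let preds := PySem.Dict.mk ((PySem.Dict.mk predictions).getD reader [])
    slides_info.foldl (fun stats si =>
      match preds.get? si.1 with
      | none => stats
      | some pred =>
        if si.2.2 == "gen" && pred == "gen" then pvBumpA stats si.2.1 "TP"
        else if si.2.2 == "gen" && pred == "real" then pvBumpA stats si.2.1 "FN"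
        else if si.2.2 == "real" && pred == "real" then pvBumpA stats si.2.1 "TN"
        else if si.2.2 == "real" && pred == "gen" then pvBumpA stats si.2.1 "FP"
        else stats) stats) (PySem.Dict.empty : PySem.Dict String (PySem.Dict String Int))
  stats.items.map (fun p => (p.1, p.2.items))

-- ===== PORT B =====
def pvTable : PySem.Dict (String × Option String) String :=
  PySem.Dict.mk [(("gen", some "gen"), "TP"), (("gen", some "real"), "FN"),
                 (("real", some "real"), "TN"), (("real", some "gen"), "FP")]

def pvEvents (slides_info : List (String × String × String)) (predictions : List (String × List (String × String))) (reader_subset : List String) : List (String × String) :=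
  reader_subset.flatMap (fun reader =>
    let preds := PySem.Dict.mk ((PySem.Dict.mk predictions).getD reader [])
    slides_info.filterMap (fun si =>
      (pvTable.get? (si.2.2, preds.get? si.1)).map (fun cls => (si.2.1, cls))))

def sequence_breakdown_alt (slides_info : List (String × String × String)) (predictions : List (String × List (String × String))) (reader_subset : List String) : List (String × List (String × Int)) :=
  let events := pvEvents slides_info predictions reader_subset
  let counts := PySem.Dict.counter events
  let order := PySem.List.dedup (events.map (·.1))
  order.map (fun seq => (seq,
    [("TN", counts.getD (seq, "TN") 0), ("FP", counts.getD (seq, "FP") 0),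
     ("FN", counts.getD (seq, "FN") 0), ("TP", counts.getD (seq, "TP") 0)]))

-- ===== PRECONDITION & SPEC =====
-- Pre_ excludes exactly the inputs on which Python A raises KeyError: a reader in reader_subset with no entry in predictions.
def Pre_sequence_breakdown (slides_info : List (String × String × String)) (predictions : List (String × List (String × String))) (reader_subset : List String) : Prop :=
  ∀ r ∈ reader_subset, r ∈ predictions.map Prod.fst
instance (slides_info : List (String × String × String)) (predictions : List (String × List (String × String))) (reader_subset : List String) : Decidable (Pre_sequence_breakdown slides_info predictions reader_subset) := by unfold Pre_sequence_breakdown; infer_instance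
def pvWitness_sequence_breakdown : (List (String × String × String)) × (List (String × List (String × String))) × List String :=
  ([("s1", "T1", "gen"), ("s2", "T2", "real")], [("r1", [("s1", "gen"), ("s2", "gen")])], ["r1"])

def Spec_sequence_breakdown (slides_info : List (String × String × String)) (predictions : List (String × List (String × String))) (reader_subset : List String) (out : List (String × List (String × Int))) : Prop := out = sequence_breakdown_alt slides_info predictions reader_subset
instance (slides_info : List (String × String × String)) (predictions : List (String × List (String × String))) (reader_subset : List String) (out : List (String × List (String × Int))) : Decidable (Spec_sequence_breakdown slides_info predictions reader_subset out) := by unfold Spec_sequence_breakdown; infer_instance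

-- ===== CLAIM (what is proved, stated in full; the proofs are below) =====
def Claim_equal_sequence_breakdown : Prop := ∀ (slides_info : List (String × String × String)) (predictions : List (String × List (String × String))) (reader_subset : List String), Dom_sequence_breakdown slides_info predictions reader_subset → Pre_sequence_breakdown slides_info predictions reader_subset → Spec_sequence_breakdown slides_info predictions reader_subset (sequence_breakdown slides_info predictions reader_subset)

-- ===== LEMMAS AND PROOFS =====

def pvStep (stats : PySem.Dict String (PySem.Dict String Int)) (ev : String × String) : PySem.Dict String (PySem.Dict String Int) :=
  stats.insert ev.1 ((stats.getD ev.1 pvDefault).modify ev.2 0 (· + 1))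

def pvInner (inner : PySem.Dict String Int) (cls : String) : PySem.Dict String Int :=
  inner.modify cls 0 (· + 1)

theorem pv_table_get (t : String) (p : Option String) :
    pvTable.get? (t, p) =
      if t = "gen" ∧ p = some "gen" then some "TP"
      else if t = "gen" ∧ p = some "real" then some "FN"
      else if t = "real" ∧ p = some "real" then some "TN"
      else if t = "real" ∧ p = some "gen" then some "FP"
      else none := by
  by_cases h1 : t = "gen" <;> by_cases h2 : t = "real" <;>
    by_cases h3 : p = some "gen" <;> by_cases h4 : p = some "real" <;>
    simp_all [pvTable, PySem.Dict.get?] <;> simp_all [eq_comm]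

-- A's nested loops are the fold of pvStep over the event list
theorem pv_loops_eq_events (slides_info : List (String × String × String)) (predictions : List (String × List (String × String))) (reader_subset : List String) (init : PySem.Dict String (PySem.Dict String Int)) :
    reader_subset.foldl (fun stats reader =>
      let preds := PySem.Dict.mk ((PySem.Dict.mk predictions).getD reader [])
      slides_info.foldl (fun stats si =>
        match preds.get? si.1 with
        | none => stats
        | some pred =>
          if si.2.2 == "gen" && pred == "gen" then pvBumpA stats si.2.1 "TP"
          else if si.2.2 == "gen" && pred == "real" then pvBumpA stats si.2.1 "FN"
          else if si.2.2 == "real" && pred == "real" then pvBumpA stats si.2.1 "TN"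
          else if si.2.2 == "real" && pred == "gen" then pvBumpA stats si.2.1 "FP"
          else stats) stats) init
    = (pvEvents slides_info predictions reader_subset).foldl pvStep init := by
  unfold pvEvents
  rw [List.foldl_flatMap]
  congr 1
  funext stats reader
  dsimp only []
  rw [List.foldl_filterMap]
  apply PySem.List.foldl_congr_mem
  intro acc x _
  rw [pv_table_get]
  generalize (PySem.Dict.mk ((PySem.Dict.mk predictions).getD reader []) : PySem.Dict String String).get? x.1 = o
  cases o with
  | none => simp
  | some pred =>
      by_cases h1 : x.2.2 = "gen" <;> by_cases h2 : x.2.2 = "real" <;>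
        by_cases h3 : pred = "gen" <;> by_cases h4 : pred = "real" <;>
        simp_all [pvBumpA, pvStep]

theorem pv_getD_fold (events : List (String × String)) : ∀ (stats : PySem.Dict String (PySem.Dict String Int)) (seq : String),
    (events.foldl pvStep stats).getD seq pvDefault
      = ((events.filter (fun e => e.1 == seq)).map (·.2)).foldl pvInner (stats.getD seq pvDefault) := by
  induction events with
  | nil => intro stats seq; simp
  | cons e rest ih =>
      intro stats seq
      by_cases h : e.1 = seq
      · subst h
        simp only [List.foldl_cons, List.filter_cons, beq_self_eq_true, ite_true, List.map_cons]
        rw [ih]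
        simp [pvStep, pvInner, PySem.Dict.getD_insert_self]
      · simp only [List.foldl_cons, List.filter_cons]
        rw [ih]
        have hb : (e.1 == seq) = false := by simpa using h
        simp only [hb, if_neg Bool.false_ne_true]
        congr 1
        simp only [pvStep]
        exact PySem.Dict.getD_insert_of_ne _ _ pvDefault (fun hc : seq = e.1 => h hc.symm)

theorem pv_update_of_subset : ∀ (L : List String) (s : PySem.Set String), (∀ x ∈ L, x ∈ s) → PySem.Set.update s L = s := by
  intro L
  induction L with
  | nil => intro s _; rfl
  | cons x rest ih =>
      intro s h
      have hx : PySem.Set.add s x = s := by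
        simp [PySem.Set.add, PySem.Set.contains, h x (by simp)]
      have : PySem.Set.update s (x :: rest) = PySem.Set.update (PySem.Set.add s x) rest := rfl
      rw [this, hx]
      exact ih s (fun y hy => h y (by simp [hy]))

theorem pv_count_classes (events : List (String × String)) (seq c : String) :
    ((events.filter (fun e => e.1 == seq)).map (·.2)).count c = events.count (seq, c) := by
  induction events with
  | nil => rfl
  | cons e rest ih =>
      simp only [List.filter_cons, List.count_cons]
      by_cases h1 : e.1 = seq
      · by_cases h2 : e.2 = c
        · have : e = (seq, c) := by cases e; simp_all
          simp_all
        · have : e ≠ (seq, c) := by intro hh; exact h2 (by rw [hh])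
          simp_all
      · have : e ≠ (seq, c) := by intro hh; exact h1 (by rw [hh])
        simp_all

theorem pv_classes_mem (slides_info : List (String × String × String)) (predictions : List (String × List (String × String))) (reader_subset : List String) :
    ∀ ev ∈ pvEvents slides_info predictions reader_subset, ev.2 = "TN" ∨ ev.2 = "FP" ∨ ev.2 = "FN" ∨ ev.2 = "TP" := by
  intro ev hev
  unfold pvEvents at hev
  obtain ⟨reader, _, hr⟩ := List.mem_flatMap.mp hev
  obtain ⟨si, _, hsi⟩ := List.mem_filterMap.mp hr
  obtain ⟨cls, hget, hev2⟩ := Option.map_eq_some_iff.mp hsi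
  have h2 : ev.2 = cls := by rw [← hev2]
  rw [h2, pv_table_get] at *
  split_ifs at hget <;> simp_all

theorem pv_inner_items (L : List String) (hL : ∀ c ∈ L, c = "TN" ∨ c = "FP" ∨ c = "FN" ∨ c = "TP") :
    (L.foldl pvInner pvDefault).items
      = [("TN", (L.count "TN" : Int)), ("FP", (L.count "FP" : Int)), ("FN", (L.count "FN" : Int)), ("TP", (L.count "TP" : Int))] := by
  have hi : pvInner = fun (d : PySem.Dict String Int) x => d.modify x 0 (· + 1) := rfl
  rw [hi]
  have hnd : (L.foldl (fun d x => d.modify x 0 (· + 1)) pvDefault).keys.Nodup := by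
    apply PySem.Dict.nodup_keys_foldl_modify_key L id 0 (fun _ _ => (· + 1)) pvDefault
    simp [pvDefault, PySem.Dict.keys]
  have hkeys : (L.foldl (fun d x => d.modify x 0 (· + 1)) pvDefault).keys = ["TN", "FP", "FN", "TP"] := by
    rw [PySem.Dict.keys_foldl_modify]
    have : pvDefault.keys = ["TN", "FP", "FN", "TP"] := by simp [pvDefault, PySem.Dict.keys]
    rw [this]
    apply pv_update_of_subset
    intro x hx
    rcases hL x hx with h | h | h | h <;> simp [h]
  rw [PySem.Dict.items_eq_map_keys _ hnd 0, hkeys]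
  simp only [List.map_cons, List.map_nil, PySem.Dict.getD_foldl_modify_add_one]
  norm_num [pvDefault, PySem.Dict.getD, PySem.Dict.get?_mk_cons]

-- ===== VERDICT (by name: the statement is the Claim_ definition above) =====
theorem sequence_breakdown_spec : Claim_equal_sequence_breakdown := by
  intro slides_info predictions reader_subset _ _
  unfold Spec_sequence_breakdown
  unfold sequence_breakdown sequence_breakdown_alt
  dsimp only []
  rw [pv_loops_eq_events]
  have hstep : pvStep = fun stats (ev : String × String) => stats.insert ev.1 ((stats.getD ev.1 pvDefault).modify ev.2 0 (· + 1)) := rfl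
  have hnd : ((pvEvents slides_info predictions reader_subset).foldl pvStep PySem.Dict.empty).keys.Nodup := by
    rw [hstep]
    exact PySem.Dict.nodup_keys_foldl_insert_key _ Prod.fst _ _ (by simp [PySem.Dict.keys_empty])
  have hkeys : ((pvEvents slides_info predictions reader_subset).foldl pvStep PySem.Dict.empty).keys
      = PySem.List.dedup ((pvEvents slides_info predictions reader_subset).map (·.1)) := by
    rw [hstep]
    rw [PySem.Dict.keys_foldl_insert_key]
    simp [PySem.Dict.keys_empty, PySem.List.dedup_eq_ofList]
    rfl
  rw [PySem.Dict.items_eq_map_keys _ hnd pvDefault, List.map_map, hkeys]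
  apply List.map_congr_left
  intro k hk
  show (k, (((pvEvents slides_info predictions reader_subset).foldl pvStep PySem.Dict.empty).getD k pvDefault).items) = _
  rw [pv_getD_fold, PySem.Dict.getD_empty]
  rw [pv_inner_items _ (by
    intro c hc
    obtain ⟨ev, hev, hc2⟩ := List.mem_map.mp hc
    have := pv_classes_mem slides_info predictions reader_subset ev (List.mem_filter.mp hev).1
    rw [← hc2]; exact this)]
  simp only [pv_count_classes, PySem.Dict.getD_counter]
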